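-- pv_equiv track=rewrite | github.com/AdamOtto/Daily-Challenges | Challenge391.py | Solution
-- ===== SOURCE A (Python) =====
-- def Solution(u1, u2):
--     temp = []
--     i = 0
--     j = i + 1
--     retVal = []
--     retVal.append(u1[0])
--     while i < len(u1):
--         temp = u1[i:j + 1]
--         if checkSubLst(u2, temp) and j < len(u1):
--             j += 1
--             if len(temp) > len(retVal):
--                 retVal = temp
--         else:
--             i += 1
--             j = min(i + 1, len(u1) - 1)
--     return retVal
--
-- def checkSubLst(u2, checkLs):
--     if checkLs[0] not in u2:
--         return False
--     i = u2.index(checkLs[0])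
--     if u2[i:i + len(checkLs)] == checkLs:
--         return True
--     return False
-- ===== SOURCE B (Python) =====
-- def Solution(u1, u2):
--     # Precompute first-occurrence index of each value in u2, then for each start i
--     # extend a single forward match; keep the first strictly-longest run of length >= 2.
--     first = {}
--     for k, v in enumerate(u2):
--         if v not in first:
--             first[v] = k
--     best_i, best_len = 0, 1
--     for i in range(len(u1)):
--         if u1[i] in first:
--             k = first[u1[i]]
--             L = 0
--             while i + L < len(u1) and k + L < len(u2) and u1[i + L] == u2[k + L]:
--                 L += 1
--             if L >= 2 and L > best_len:
--                 best_i, best_len = i, L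
--     if best_len >= 2:
--         return u1[best_i:best_i + best_len]
--     return [u1[0]]
-- ===== Notes on version B (the rewrite author's own statement) =====
-- stated objective: faster
-- what changed: B precomputes a first-occurrence dictionary of u2 once and, for each start index i of u1, extends a single forward element-by-element match, tracking only the (start, length) of the first longest block, instead of A's while-loop that rebuilds a slice and re-scans u2 with 'in'/'index'/slice comparison at every extension step.
import Mathlib
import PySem

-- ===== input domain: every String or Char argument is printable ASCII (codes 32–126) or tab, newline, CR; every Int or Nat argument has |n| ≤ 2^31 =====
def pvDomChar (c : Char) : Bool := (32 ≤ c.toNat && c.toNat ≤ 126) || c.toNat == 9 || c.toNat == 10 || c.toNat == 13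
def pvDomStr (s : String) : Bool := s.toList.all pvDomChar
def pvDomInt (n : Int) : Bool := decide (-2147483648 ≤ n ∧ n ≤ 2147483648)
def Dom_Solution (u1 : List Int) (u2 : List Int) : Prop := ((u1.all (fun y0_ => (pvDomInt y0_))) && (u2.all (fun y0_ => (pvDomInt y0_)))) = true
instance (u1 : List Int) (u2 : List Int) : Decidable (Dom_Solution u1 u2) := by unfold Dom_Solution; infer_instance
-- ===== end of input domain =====

-- B changes the algorithm: a first-occurrence dict of u2 built once plus one forward extension per start,
-- instead of A's re-slicing while-loop that re-scans u2 at every extension step. Equivalence on nonempty u1.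

-- ===== PORT A =====
-- checkSubLst(u2, checkLs): checkLs[0] would raise on empty checkLs; every call from Solution passes a
-- nonempty slice, so headI is exact there.
def checkSubLst (u2 checkLs : List Int) : Bool :=
  if checkLs.headI ∈ u2 then
    match PySem.List.index? u2 checkLs.headI with
    | some i => decide (PySem.List.slice u2 (some (i : Int)) (some ((i : Int) + (checkLs.length : Int))) = checkLs)
    | none => false
  else false

-- measure decrease for the else-branch of the while loop
theorem loopA_dec2 (len i j j' : Nat) (h : i < len) (hj' : j' ≤ len + 1) :
    (len - (i + 1)) * (len + 3) + (len + 1 - j') < (len - i) * (len + 3) + (len + 1 - j) := by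
  have h1 : len - (i + 1) + 1 = len - i := by omega
  calc (len - (i + 1)) * (len + 3) + (len + 1 - j')
      < (len - (i + 1)) * (len + 3) + (len + 3) := by omega
    _ = (len - (i + 1) + 1) * (len + 3) := by ring
    _ = (len - i) * (len + 3) := by rw [h1]
    _ ≤ (len - i) * (len + 3) + (len + 1 - j) := Nat.le_add_right _ _

-- the while loop of Solution (state i, j, retVal)
def loopA (u1 u2 : List Int) (i j : Nat) (retVal : List Int) : List Int :=
  if hi : i < u1.length then
    let temp := PySem.List.slice u1 (some (i : Int)) (some ((j : Int) + 1))
    if hc : checkSubLst u2 temp = true ∧ j < u1.length then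
      loopA u1 u2 i (j + 1) (if retVal.length < temp.length then temp else retVal)
    else
      loopA u1 u2 (i + 1) (min (i + 2) (u1.length - 1)) retVal
  else retVal
termination_by (u1.length - i) * (u1.length + 3) + (u1.length + 1 - j)
decreasing_by
  · omega
  · exact loopA_dec2 u1.length i j (min (i + 2) (u1.length - 1)) hi (by omega)

-- Solution: u1[0] raises IndexError on empty u1 (excluded by Pre_); headI is exact on nonempty u1.
def Solution (u1 : List Int) (u2 : List Int) : List Int :=
  loopA u1 u2 0 1 [u1.headI]

-- ===== PORT B =====
-- first = {} ; for k, v in enumerate(u2): if v not in first: first[v] = k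
def firstDict (u2 : List Int) : PySem.Dict Int Int :=
  (PySem.List.enumerate u2).foldl
    (fun d kv => if d.contains kv.2 then d else d.insert kv.2 kv.1) PySem.Dict.empty

-- L = 0 ; while i+L < len(u1) and k+L < len(u2) and u1[i+L] == u2[k+L]: L += 1
def extendRun (u1 u2 : List Int) (i k L : Nat) : Nat :=
  if h : i + L < u1.length ∧ k + L < u2.length ∧ u1.getD (i + L) 0 = u2.getD (k + L) 0 then
    extendRun u1 u2 i k (L + 1)
  else L
termination_by u1.length - (i + L)

-- for i in range(len(u1)): … tracking (best_i, best_len)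
def bestFold (u1 u2 : List Int) : Nat × Nat :=
  (List.range u1.length).foldl
    (fun bl i =>
      match (firstDict u2).get? (u1.getD i 0) with
      | some k =>
          let L := extendRun u1 u2 i k.toNat 0
          if 2 ≤ L ∧ bl.2 < L then (i, L) else bl
      | none => bl)
    (0, 1)

def Solution_alt (u1 : List Int) (u2 : List Int) : List Int :=
  let bl := bestFold u1 u2
  if 2 ≤ bl.2 then
    PySem.List.slice u1 (some (bl.1 : Int)) (some ((bl.1 : Int) + (bl.2 : Int)))
  else [u1.headI]

-- ===== PRECONDITION & SPEC =====
-- Pre_ excludes exactly empty u1, on which A's 'u1[0]' raises IndexError (B raises there too).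
def Pre_Solution (u1 : List Int) (u2 : List Int) : Prop := u1 ≠ []
instance (u1 : List Int) (u2 : List Int) : Decidable (Pre_Solution u1 u2) := by unfold Pre_Solution; infer_instance
def pvWitness_Solution : List Int × List Int := ([5, 1, 2, 3], [1, 2, 3, 4])

def Spec_Solution (u1 : List Int) (u2 : List Int) (out : List Int) : Prop := out = Solution_alt u1 u2
instance (u1 : List Int) (u2 : List Int) (out : List Int) : Decidable (Spec_Solution u1 u2 out) := by unfold Spec_Solution; infer_instance

-- ===== CLAIM (what is proved, stated in full; the proofs are below) =====
def Claim_equal_Solution : Prop := ∀ (u1 : List Int) (u2 : List Int), Dom_Solution u1 u2 → Pre_Solution u1 u2 → Spec_Solution u1 u2 (Solution u1 u2)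

-- ===== LEMMAS AND PROOFS =====

-- common prefix length of two lists
def cpl : List Int → List Int → Nat
  | x :: xs, y :: ys => if x = y then cpl xs ys + 1 else 0
  | _, _ => 0

-- the greedy candidate length at start i: match u1 from i against u2 from the first occurrence of u1[i]
def cand (u1 u2 : List Int) (i : Nat) : Nat :=
  match PySem.List.index? u2 (u1.getD i 0) with
  | some k => cpl (u1.drop i) (u2.drop k)
  | none => 0

theorem cpl_le_left : ∀ xs ys : List Int, cpl xs ys ≤ xs.length := by
  intro xs
  induction xs with
  | nil => intro ys; cases ys <;> simp [cpl]
  | cons x xs ih =>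
    intro ys
    cases ys with
    | nil => simp [cpl]
    | cons y ys =>
      simp only [cpl, List.length_cons]
      split
      · have := ih ys; omega
      · omega

theorem cpl_le_iff (t : Nat) : ∀ xs ys : List Int,
    (t ≤ cpl xs ys ↔ t ≤ xs.length ∧ t ≤ ys.length ∧ xs.take t = ys.take t) := by
  induction t with
  | zero => intro xs ys; simp
  | succ t ih =>
    intro xs ys
    cases xs with
    | nil => simp [cpl]
    | cons x xs =>
      cases ys with
      | nil => cases xs <;> simp [cpl]
      | cons y ys =>
        by_cases hxy : x = y
        · subst hxy
          rw [show cpl (x :: xs) (x :: ys) = cpl xs ys + 1 from by simp [cpl]]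
          simp only [List.length_cons, List.take_succ_cons, List.cons.injEq]
          have hx := ih xs ys
          constructor
          · intro h; exact ⟨by omega, by omega, trivial, (hx.mp (by omega)).2.2⟩
          · rintro ⟨h1, h2, -, h3⟩; have := hx.mpr ⟨by omega, by omega, h3⟩; omega
        · simp only [cpl, if_neg hxy, List.take_succ_cons, List.cons.injEq]
          constructor
          · omega
          · intro ⟨_, _, h, _⟩; exact absurd h hxy

theorem drop_cons_getD (l : List Int) (i : Nat) (h : i < l.length) :
    l.drop i = l.getD i 0 :: l.drop (i + 1) := by
  rw [List.getD_eq_getElem l 0 h]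
  exact List.drop_eq_getElem_cons h

theorem cand_le (u1 u2 : List Int) (i : Nat) : cand u1 u2 i ≤ u1.length - i := by
  unfold cand
  cases h : PySem.List.index? u2 (u1.getD i 0) with
  | none => simp
  | some k =>
    have := cpl_le_left (u1.drop i) (u2.drop k)
    simpa using this

-- checkSubLst on the slice u1[i : i+t] decides t ≤ cand i
theorem checkSubLst_iff (u1 u2 : List Int) (i t : Nat) (hi : i < u1.length) (ht1 : 1 ≤ t)
    (ht2 : t ≤ u1.length - i) :
    (checkSubLst u2 ((u1.drop i).take t) = true ↔ t ≤ cand u1 u2 i) := by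
  have hdrop : u1.drop i = u1.getD i 0 :: u1.drop (i + 1) := drop_cons_getD u1 i hi
  have hhead : ((u1.drop i).take t).headI = u1.getD i 0 := by
    rw [hdrop]; cases t with
    | zero => omega
    | succ t => simp
  have hlen : ((u1.drop i).take t).length = t := by
    simp only [List.length_take, List.length_drop]; omega
  unfold checkSubLst
  rw [hhead]
  by_cases hmem : u1.getD i 0 ∈ u2
  · rw [if_pos hmem]
    obtain ⟨k, hk⟩ : ∃ k, PySem.List.index? u2 (u1.getD i 0) = some k := by
      have h1 : (PySem.List.index? u2 (u1.getD i 0)).isSome := by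
        rw [PySem.List.index?_isSome_iff]; exact hmem
      exact Option.isSome_iff_exists.mp h1
    obtain ⟨hklt, hkeq, -⟩ := PySem.List.getElem_of_index?_eq_some hk
    have hslice : PySem.List.slice u2 (some (k : Int))
        (some ((k : Int) + (((u1.drop i).take t).length : Int))) = (u2.drop k).take t := by
      rw [hlen]; exact PySem.List.slice_natCast_add u2 k t
    simp only [hk, hslice, decide_eq_true_eq]
    unfold cand
    rw [hk, cpl_le_iff]
    constructor
    · intro heq
      have hl2 : t ≤ u2.length - k := by
        have := congrArg List.length heq
        simp only [List.length_take, List.length_drop, hlen] at this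
        omega
      refine ⟨by simp only [List.length_drop]; omega, by simp only [List.length_drop]; omega, heq.symm⟩
    · rintro ⟨h1, h2, h3⟩; exact h3.symm
  · rw [if_neg hmem]
    have hnone : PySem.List.index? u2 (u1.getD i 0) = none := by
      rw [PySem.List.index?_eq_none_iff]; exact hmem
    unfold cand
    rw [hnone]
    simp; omega

theorem extendRun_eq (u1 u2 : List Int) (i k : Nat) :
    ∀ L, extendRun u1 u2 i k L = L + cpl (u1.drop (i + L)) (u2.drop (k + L)) := by
  suffices h : ∀ fuel L, u1.length - (i + L) ≤ fuel →
      extendRun u1 u2 i k L = L + cpl (u1.drop (i + L)) (u2.drop (k + L)) from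
    fun L => h _ L le_rfl
  intro fuel
  induction fuel with
  | zero =>
    intro L hf
    rw [extendRun, dif_neg (by omega)]
    rw [List.drop_eq_nil_of_le (show u1.length ≤ i + L by omega)]
    cases u2.drop (k + L) <;> simp [cpl]
  | succ fuel ih =>
    intro L hf
    rw [extendRun]
    by_cases hcond : i + L < u1.length ∧ k + L < u2.length ∧ u1.getD (i + L) 0 = u2.getD (k + L) 0
    · rw [dif_pos hcond, ih (L + 1) (by omega)]
      obtain ⟨h1, h2, h3⟩ := hcond
      rw [show i + (L + 1) = (i + L) + 1 from rfl, show k + (L + 1) = (k + L) + 1 from rfl]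
      rw [drop_cons_getD u1 (i + L) h1, drop_cons_getD u2 (k + L) h2]
      simp only [cpl]
      rw [if_pos h3]
      omega
    · rw [dif_neg hcond]
      push Not at hcond
      rcases Nat.lt_or_ge (i + L) u1.length with h1 | h1
      · rcases Nat.lt_or_ge (k + L) u2.length with h2 | h2
        · have h3 := hcond h1 h2
          rw [drop_cons_getD u1 (i + L) h1, drop_cons_getD u2 (k + L) h2]
          simp only [cpl]
          rw [if_neg h3]
          omega

        · rw [List.drop_eq_nil_of_le (show u2.length ≤ k + L by omega)]
          cases u1.drop (i + L) <;> simp [cpl]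
      · rw [List.drop_eq_nil_of_le (show u1.length ≤ i + L by omega)]
        cases u2.drop (k + L) <;> simp [cpl]

theorem firstDict_get? (u2 : List Int) (v : Int) :
    (firstDict u2).get? v = (PySem.List.index? u2 v).map (fun k : Nat => (k : Int)) := by
  have aux : ∀ (l : List Int) (s : Int) (d : PySem.Dict Int Int),
      ((PySem.List.enumerate l s).foldl
        (fun d kv => if d.contains kv.2 then d else d.insert kv.2 kv.1) d).get? v =
      (d.get? v).or ((PySem.List.index? l v).map (fun k : Nat => s + (k : Int))) := by
    intro l
    induction l with
    | nil =>
      intro s d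
      simp [PySem.List.enumerate_nil]
    | cons x xs ih =>
      intro s d
      rw [PySem.List.enumerate_cons]
      simp only [List.foldl_cons]
      rw [ih (s + 1)]
      by_cases hxv : x = v
      · subst hxv
        rw [PySem.List.index?_cons_self]
        cases hd : PySem.Dict.contains d x with
        | true =>
          simp only [if_true]
          have : (PySem.Dict.get? d x).isSome := by
            rw [← PySem.Dict.contains_eq_isSome_get?]; exact hd
          obtain ⟨w, hw⟩ := Option.isSome_iff_exists.mp this
          simp [hw]
        | false =>
          rw [if_neg (by simp [hd])]
          rw [PySem.Dict.get?_insert_self]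
          have hdn : PySem.Dict.get? d x = none := by
            rw [PySem.Dict.get?_eq_none_iff_contains]
            exact hd
          simp [hdn]
      · rw [PySem.List.index?_cons_of_ne xs hxv]
        have hstep : (if d.contains x = true then d else d.insert x s).get? v = d.get? v := by
          split
          · rfl
          · exact PySem.Dict.get?_insert_of_ne d s (Ne.symm hxv)
        rw [hstep]
        congr 1
        cases PySem.List.index? xs v with
        | none => simp
        | some k => simp; push_cast; ring
  rw [show firstDict u2 = (PySem.List.enumerate u2).foldl
      (fun d kv => if d.contains kv.2 then d else d.insert kv.2 kv.1) PySem.Dict.empty from rfl]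
  rw [aux u2 0 PySem.Dict.empty]
  simp [PySem.Dict.get?_empty]

-- zeta-reduced unfolding equation for loopA
theorem loopA_unfold (u1 u2 : List Int) (i j : Nat) (ret : List Int) :
    loopA u1 u2 i j ret =
      if i < u1.length then
        (if checkSubLst u2 (PySem.List.slice u1 (some (i : Int)) (some ((j : Int) + 1))) = true
            ∧ j < u1.length then
          loopA u1 u2 i (j + 1)
            (if ret.length < (PySem.List.slice u1 (some (i : Int)) (some ((j : Int) + 1))).length
             then PySem.List.slice u1 (some (i : Int)) (some ((j : Int) + 1)) else ret)
        else loopA u1 u2 (i + 1) (min (i + 2) (u1.length - 1)) ret)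
      else ret := by
  rw [loopA]
  rfl

-- the net effect of the inner (j-advancing) phase of loopA
theorem loopA_inner (u1 u2 : List Int) (i : Nat) :
    ∀ j ret, i < u1.length → i ≤ j → 1 ≤ ret.length →
    loopA u1 u2 i j ret =
      loopA u1 u2 (i + 1) (min (i + 2) (u1.length - 1))
        (if j + 1 ≤ i + cand u1 u2 i ∧ j < u1.length ∧ ret.length < cand u1 u2 i then
           (u1.drop i).take (cand u1 u2 i)
         else ret) := by
  suffices aux : ∀ fuel j ret, u1.length + 1 - j ≤ fuel → i < u1.length → i ≤ j → 1 ≤ ret.length →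
      loopA u1 u2 i j ret =
        loopA u1 u2 (i + 1) (min (i + 2) (u1.length - 1))
          (if j + 1 ≤ i + cand u1 u2 i ∧ j < u1.length ∧ ret.length < cand u1 u2 i then
             (u1.drop i).take (cand u1 u2 i)
           else ret) from
    fun j ret h1 h2 h3 => aux _ j ret le_rfl h1 h2 h3
  intro fuel
  induction fuel with
  | zero =>
    intro j ret hf hi hij hr
    rw [loopA_unfold, if_pos hi, if_neg (by rintro ⟨-, hj⟩; omega),
      if_neg (by rintro ⟨-, hj, -⟩; omega)]
  | succ fuel ih =>
    intro j ret hf hi hij hr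
    have hslice : PySem.List.slice u1 (some (i : Int)) (some ((j : Int) + 1))
        = (u1.drop i).take (j + 1 - i) := by
      rw [show ((j : Int) + 1) = ((j + 1 : Nat) : Int) by push_cast; ring]
      rw [PySem.List.slice_natCast]
    have htlen : (PySem.List.slice u1 (some (i : Int)) (some ((j : Int) + 1))).length
        = min (j + 1 - i) (u1.length - i) := by
      rw [hslice]; simp [List.length_take, List.length_drop]
    have hcle : cand u1 u2 i ≤ u1.length - i := cand_le u1 u2 i
    rw [loopA_unfold, if_pos hi]
    by_cases hj : j < u1.length
    · by_cases hm : j + 1 ≤ i + cand u1 u2 i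
      · have hcsl : checkSubLst u2 (PySem.List.slice u1 (some (i : Int)) (some ((j : Int) + 1)))
            = true := by
          rw [hslice, checkSubLst_iff u1 u2 i (j + 1 - i) hi (by omega) (by omega)]
          omega
        rw [if_pos ⟨hcsl, hj⟩]
        rw [ih (j + 1)
          (if ret.length < (PySem.List.slice u1 (some (i : Int)) (some ((j : Int) + 1))).length
           then PySem.List.slice u1 (some (i : Int)) (some ((j : Int) + 1)) else ret)
          (by omega) hi (by omega) (by split <;> omega)]
        congr 1
        by_cases h2 : j + 2 ≤ i + cand u1 u2 i
        · have hj1 : j + 1 < u1.length := by omega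
          by_cases hrc : ret.length < cand u1 u2 i
          · have hnew : (if ret.length <
                (PySem.List.slice u1 (some (i : Int)) (some ((j : Int) + 1))).length
                then PySem.List.slice u1 (some (i : Int)) (some ((j : Int) + 1)) else ret).length
                < cand u1 u2 i := by
              split
              · omega
              · exact hrc
            rw [if_pos ⟨h2, hj1, hnew⟩, if_pos ⟨hm, hj, hrc⟩]
          · have hretkeep : (if ret.length <
                (PySem.List.slice u1 (some (i : Int)) (some ((j : Int) + 1))).length
                then PySem.List.slice u1 (some (i : Int)) (some ((j : Int) + 1)) else ret) = ret := by
              rw [if_neg]; omega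
            rw [hretkeep, if_neg (by rintro ⟨-, -, h⟩; omega),
              if_neg (by rintro ⟨-, -, h⟩; omega)]
        · have hceq : i + cand u1 u2 i = j + 1 := by omega
          rw [if_neg (by rintro ⟨hh, -, -⟩; omega)]
          rw [hslice]
          have hteq : j + 1 - i = cand u1 u2 i := by omega
          rw [hteq,
            show ((u1.drop i).take (cand u1 u2 i)).length = cand u1 u2 i from by
              simp only [List.length_take, List.length_drop]; omega]
          by_cases hrc : ret.length < cand u1 u2 i
          · rw [if_pos hrc, if_pos ⟨hm, hj, hrc⟩]
          · rw [if_neg hrc, if_neg (by rintro ⟨-, -, h⟩; exact hrc h)]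
      · have hcsl : ¬ (checkSubLst u2 (PySem.List.slice u1 (some (i : Int)) (some ((j : Int) + 1)))
            = true) := by
          rw [hslice, checkSubLst_iff u1 u2 i (j + 1 - i) hi (by omega) (by omega)]
          omega
        rw [if_neg (by rintro ⟨h, -⟩; exact hcsl h),
          if_neg (by rintro ⟨h, -, -⟩; exact hm h)]
    · rw [if_neg (by rintro ⟨-, h⟩; exact hj h),
        if_neg (by rintro ⟨-, h, -⟩; exact hj h)]

-- the outer phase of loopA as a simple fold over start indices
def F (u1 u2 : List Int) (i : Nat) (ret : List Int) : List Int :=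
  if i < u1.length then
    F u1 u2 (i + 1)
      (if ret.length < cand u1 u2 i then (u1.drop i).take (cand u1 u2 i) else ret)
  else ret
termination_by u1.length - i

theorem loopA_outer (u1 u2 : List Int) :
    ∀ i ret, 1 ≤ ret.length →
    loopA u1 u2 i (min (i + 1) (u1.length - 1)) ret = F u1 u2 i ret := by
  suffices aux : ∀ fuel i ret, u1.length - i ≤ fuel → 1 ≤ ret.length →
      loopA u1 u2 i (min (i + 1) (u1.length - 1)) ret = F u1 u2 i ret from
    fun i ret hr => aux _ i ret le_rfl hr
  intro fuel
  induction fuel with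
  | zero =>
    intro i ret hf hr
    rw [loopA_unfold, if_neg (by omega), F, if_neg (by omega)]
  | succ fuel ih =>
    intro i ret hf hr
    by_cases hi : i < u1.length
    · rw [loopA_inner u1 u2 i (min (i + 1) (u1.length - 1)) ret hi (by omega) hr]
      have hcle := cand_le u1 u2 i
      have harg : (if (min (i + 1) (u1.length - 1)) + 1 ≤ i + cand u1 u2 i ∧
            (min (i + 1) (u1.length - 1)) < u1.length ∧ ret.length < cand u1 u2 i then
          (u1.drop i).take (cand u1 u2 i) else ret)
          = (if ret.length < cand u1 u2 i then (u1.drop i).take (cand u1 u2 i) else ret) := by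
        by_cases hrc : ret.length < cand u1 u2 i
        · rw [if_pos hrc, if_pos ⟨by omega, by omega, hrc⟩]
        · rw [if_neg (by rintro ⟨-, -, hh⟩; exact hrc hh), if_neg hrc]
      rw [harg]
      have hlen' : 1 ≤ (if ret.length < cand u1 u2 i then
          (u1.drop i).take (cand u1 u2 i) else ret).length := by
        split
        · simp only [List.length_take, List.length_drop]; omega
        · exact hr
      have h12 : i + 2 = (i + 1) + 1 := by omega
      rw [h12, ih (i + 1) _ (by omega) hlen']
      conv_rhs => rw [F]
      rw [if_pos hi]
    · rw [loopA_unfold, if_neg hi, F, if_neg hi]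

theorem Solution_eq_F (u1 u2 : List Int) (h : u1 ≠ []) :
    Solution u1 u2 = F u1 u2 0 [u1.headI] := by
  have hn : 0 < u1.length := List.length_pos_of_ne_nil h
  unfold Solution
  by_cases h2 : 2 ≤ u1.length
  · rw [show (1 : Nat) = min (0 + 1) (u1.length - 1) by omega]
    exact loopA_outer u1 u2 0 [u1.headI] (by simp)
  · have hn1 : u1.length = 1 := by omega
    rw [loopA_unfold, if_pos (by omega), if_neg (by rintro ⟨-, hh⟩; omega),
      loopA_unfold, if_neg (by omega)]
    conv_rhs => rw [F]
    rw [if_pos (by omega)]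
    have hcle := cand_le u1 u2 0
    rw [show (if ([u1.headI].length < cand u1 u2 0) then
        (u1.drop 0).take (cand u1 u2 0) else [u1.headI]) = [u1.headI] from by
      rw [if_neg]; simp only [List.length_cons, List.length_nil]; omega]
    conv_rhs => rw [F]
    rw [if_neg (by omega)]

-- the loop body of bestFold as a named function (definitionally equal to the lambda in bestFold)
def stepB (u1 u2 : List Int) (bl : Nat × Nat) (i : Nat) : Nat × Nat :=
  match (firstDict u2).get? (u1.getD i 0) with
  | some k =>
      let L := extendRun u1 u2 i k.toNat 0
      if 2 ≤ L ∧ bl.2 < L then (i, L) else bl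
  | none => bl

theorem bestFold_eq (u1 u2 : List Int) :
    bestFold u1 u2 = (List.range' 0 u1.length).foldl (stepB u1 u2) (0, 1) := by
  rw [← List.range_eq_range']; rfl

theorem stepB_none (u1 u2 : List Int) (bl : Nat × Nat) (i : Nat)
    (hd : (firstDict u2).get? (u1.getD i 0) = none) : stepB u1 u2 bl i = bl := by
  unfold stepB; rw [hd]

theorem stepB_some (u1 u2 : List Int) (b l i : Nat) (k0 : Nat)
    (hd : (firstDict u2).get? (u1.getD i 0) = some ((k0 : Int)))
    (hL : extendRun u1 u2 i ((k0 : Int)).toNat 0 = cand u1 u2 i) :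
    stepB u1 u2 (b, l) i =
      if 2 ≤ cand u1 u2 i ∧ l < cand u1 u2 i then (i, cand u1 u2 i) else (b, l) := by
  unfold stepB; rw [hd]; simp only [hL]

theorem bestFold_inv (u1 u2 : List Int) (h : u1 ≠ []) :
    ∀ k i b l, i + k = u1.length → 1 ≤ l → b + l ≤ u1.length → (2 ≤ l ∨ (b = 0 ∧ l = 1)) →
    F u1 u2 i ((u1.drop b).take l) =
      (fun bl : Nat × Nat =>
        if 2 ≤ bl.2 then (u1.drop bl.1).take bl.2 else [u1.headI])
      ((List.range' i k).foldl (stepB u1 u2) (b, l)) := by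
  intro k
  induction k with
  | zero =>
    intro i b l h1 h2 h3 h4
    rw [List.range'_zero, List.foldl_nil, F, if_neg (by omega)]
    beta_reduce
    rcases h4 with h4 | ⟨hb, hl⟩
    · rw [if_pos h4]
    · subst hb; subst hl
      rw [if_neg (by omega)]
      cases u1 with
      | nil => exact absurd rfl h
      | cons a as => simp
  | succ k ihk =>
    intro i b l h1 h2 h3 h4
    have hi : i < u1.length := by omega
    rw [List.range'_succ, List.foldl_cons]
    conv_lhs => rw [F]
    rw [if_pos hi]
    have hretlen : ((u1.drop b).take l).length = l := by
      simp only [List.length_take, List.length_drop]; omega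
    have hcle := cand_le u1 u2 i
    cases hx : PySem.List.index? u2 (u1.getD i 0) with
    | none =>
      have hc0 : cand u1 u2 i = 0 := by unfold cand; rw [hx]
      have hd : (firstDict u2).get? (u1.getD i 0) = none := by
        rw [firstDict_get?, hx]; rfl
      rw [stepB_none u1 u2 (b, l) i hd]
      rw [show (if ((u1.drop b).take l).length < cand u1 u2 i then
          (u1.drop i).take (cand u1 u2 i) else (u1.drop b).take l) = (u1.drop b).take l from by
        rw [if_neg]; omega]
      exact ihk (i + 1) b l (by omega) h2 h3 h4
    | some k0 =>
      have hd : (firstDict u2).get? (u1.getD i 0) = some ((k0 : Int)) := by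
        rw [firstDict_get?, hx]; rfl
      have hL : extendRun u1 u2 i ((k0 : Int)).toNat 0 = cand u1 u2 i := by
        rw [Int.toNat_natCast, extendRun_eq]
        unfold cand
        rw [hx]
        simp
      rw [stepB_some u1 u2 b l i k0 hd hL]
      by_cases hlt : l < cand u1 u2 i
      · have h2c : 2 ≤ cand u1 u2 i := by omega
        rw [show (if ((u1.drop b).take l).length < cand u1 u2 i then
            (u1.drop i).take (cand u1 u2 i) else (u1.drop b).take l)
            = (u1.drop i).take (cand u1 u2 i) from by rw [hretlen, if_pos hlt]]
        rw [show (if 2 ≤ cand u1 u2 i ∧ l < cand u1 u2 i then (i, cand u1 u2 i) else (b, l))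
            = (i, cand u1 u2 i) from if_pos ⟨h2c, hlt⟩]
        exact ihk (i + 1) i (cand u1 u2 i) (by omega) (by omega) (by omega) (Or.inl h2c)
      · rw [show (if ((u1.drop b).take l).length < cand u1 u2 i then
            (u1.drop i).take (cand u1 u2 i) else (u1.drop b).take l)
            = (u1.drop b).take l from by rw [hretlen, if_neg hlt]]
        rw [show (if 2 ≤ cand u1 u2 i ∧ l < cand u1 u2 i then (i, cand u1 u2 i) else (b, l))
            = (b, l) from if_neg (by rintro ⟨-, hh⟩; exact hlt hh)]
        exact ihk (i + 1) b l (by omega) h2 h3 h4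

theorem slice_eq_take_drop (u1 : List Int) (a b : Nat) :
    PySem.List.slice u1 (some (a : Int)) (some ((a : Int) + (b : Int))) = (u1.drop a).take b := by
  exact PySem.List.slice_natCast_add u1 a b

-- ===== VERDICT (by name: the statement is the Claim_ definition above) =====
theorem Solution_spec : Claim_equal_Solution := by
  intro u1 u2 hdom hpre
  unfold Spec_Solution
  have hn : 0 < u1.length := List.length_pos_of_ne_nil hpre
  rw [Solution_eq_F u1 u2 hpre]
  rw [show ([u1.headI] : List Int) = (u1.drop 0).take 1 from by
    cases u1 with
    | nil => exact absurd rfl hpre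
    | cons a as => simp]
  rw [bestFold_inv u1 u2 hpre u1.length 0 0 1 (by omega) le_rfl (by omega) (Or.inr ⟨rfl, rfl⟩)]
  beta_reduce
  unfold Solution_alt
  rw [bestFold_eq]
  obtain ⟨b, l⟩ := (List.range' 0 u1.length).foldl (stepB u1 u2) (0, 1)
  by_cases h2 : 2 ≤ l
  · rw [if_pos h2, if_pos h2, slice_eq_take_drop]
  · rw [if_neg h2, if_neg h2]
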